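-- pv_equiv track=rewrite | github.com/fsabiu/MembershipAttack | util.py | get_features_map
-- ===== SOURCE A (Python) =====
-- from _collections import defaultdict
--
-- def get_features_map(feature_names, real_feature_names):
--     features_map = defaultdict(dict)
--     i = 0
--     j = 0
--
--     while i < len(feature_names) and j < len(real_feature_names):
--         if feature_names[i] == real_feature_names[j]:
--             features_map[j][feature_names[i].replace('%s=' % real_feature_names[j], '')] = i
--             i += 1
--             j += 1
--         elif feature_names[i].startswith(real_feature_names[j]):
--             features_map[j][feature_names[i].replace('%s=' % real_feature_names[j], '')] = i
--             i += 1
--         else: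
--             j += 1
--     return features_map
-- ===== SOURCE B (Python) =====
-- def get_features_map(feature_names, real_feature_names):
--     # Staged re-implementation: first compute the segmentation of feature_names
--     # into per-real-feature spans, then assemble the map from the spans.
--     n = len(feature_names)
--
--     def run_end(start, r):
--         # index just past the block of encoded names for r beginning at start
--         for k in range(start, n):
--             f = feature_names[k]
--             if not f.startswith(r):
--                 return k
--             if f == r:
--                 return k + 1
--         return n
--
--     # stage 1: span boundaries (spans[j] = half-open range of j's encoded names)
--     spans = []
--     cur = 0
--     for r in real_feature_names:
--         end = run_end(cur, r)
--         spans.append((cur, end))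
--         cur = end
--
--     # stage 2: assemble the map from the spans
--     out = {}
--     for j, (r, (lo, hi)) in enumerate(zip(real_feature_names, spans)):
--         if lo < hi:
--             out[j] = {feature_names[k].replace(r + '=', ''): k for k in range(lo, hi)}
--     return out
-- ===== Notes on version B (the rewrite author's own statement) =====
-- stated objective: alternative
-- what changed: A's single fused two-cursor while-loop that mutates a defaultdict per element is replaced by two staged passes: pass 1 computes the segmentation of feature_names into per-real-feature index spans, pass 2 assembles a plain dict from those spans with one dict comprehension per nonempty span.
import Mathlib
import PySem

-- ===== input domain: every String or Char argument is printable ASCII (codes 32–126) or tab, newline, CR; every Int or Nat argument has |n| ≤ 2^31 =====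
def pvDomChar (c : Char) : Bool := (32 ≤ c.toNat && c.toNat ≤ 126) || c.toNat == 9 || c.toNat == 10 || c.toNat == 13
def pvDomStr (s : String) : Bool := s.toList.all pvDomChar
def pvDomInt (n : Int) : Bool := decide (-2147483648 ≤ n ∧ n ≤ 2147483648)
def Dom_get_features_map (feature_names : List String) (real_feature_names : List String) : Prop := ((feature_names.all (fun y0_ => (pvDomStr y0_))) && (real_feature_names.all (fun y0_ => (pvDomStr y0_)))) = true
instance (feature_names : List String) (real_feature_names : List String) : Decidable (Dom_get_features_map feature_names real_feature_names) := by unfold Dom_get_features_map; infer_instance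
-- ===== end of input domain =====

-- B replaces A's fused two-cursor while-loop by two staged passes (segmentation spans,
-- then per-span dict assembly); alternative decomposition, same cost.


-- ===== PORT A =====
-- helper: features_map[j][key] = i  on a defaultdict(dict)
def pvPut (d : PySem.Dict Int (PySem.Dict String Int)) (j : Nat) (s r : String) (i : Nat) :
    PySem.Dict Int (PySem.Dict String Int) :=
  d.insert (j : Int) ((d.getD (j : Int) PySem.Dict.empty).insert (PySem.Str.replace s (r ++ "=") "") (i : Int))

-- A's while-loop, step for step (three branches, two cursors)
def loopA (fn rn : List String) (d : PySem.Dict Int (PySem.Dict String Int)) (i j : Nat) :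
    PySem.Dict Int (PySem.Dict String Int) :=
  if i < fn.length ∧ j < rn.length then
    if fn.getD i "" = rn.getD j "" then
      loopA fn rn (pvPut d j (fn.getD i "") (rn.getD j "") i) (i+1) (j+1)
    else if PySem.Str.startswith (fn.getD i "") (rn.getD j "") then
      loopA fn rn (pvPut d j (fn.getD i "") (rn.getD j "") i) (i+1) j
    else
      loopA fn rn d i (j+1)
  else d
termination_by (fn.length - i) + (rn.length - j)
decreasing_by all_goals omega

def get_features_map (feature_names : List String) (real_feature_names : List String) :
    List (Int × List (String × Int)) :=
  (loopA feature_names real_feature_names PySem.Dict.empty 0 0).items.map (fun p => (p.1, p.2.items))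

-- ===== PORT B =====
-- run_end(start, r): index just past the block of encoded names for r beginning at start
def runEnd (fn : List String) (n : Nat) (r : String) (k : Nat) : Nat :=
  if h : k < n then
    if ¬ PySem.Str.startswith (fn.getD k "") r then k
    else if fn.getD k "" = r then k + 1
    else runEnd fn n r (k+1)
  else n
termination_by n - k
decreasing_by omega

-- stage 1: span boundaries (spans, cur) accumulated over real_feature_names
def spansB (fn rn : List String) : List (Nat × Nat) × Nat :=
  rn.foldl (fun acc r =>
    let e := runEnd fn fn.length r acc.2
    (acc.1 ++ [(acc.2, e)], e)) ([], 0)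

-- stage 2: assemble the map from the spans
def get_features_map_alt (feature_names : List String) (real_feature_names : List String) :
    List (Int × List (String × Int)) :=
  ((PySem.List.enumerate
      (real_feature_names.zip (spansB feature_names real_feature_names).1)).foldl
    (fun d p =>
      if p.2.2.1 < p.2.2.2 then
        d.insert p.1 ((PySem.List.pyRange (p.2.2.1 : Int) (p.2.2.2 : Int) 1).foldl
          (fun m k => m.insert
            (PySem.Str.replace (PySem.List.pyGetD feature_names k "") (p.2.1 ++ "=") "") k)
          PySem.Dict.empty)
      else d)
    PySem.Dict.empty).items.map (fun q => (q.1, q.2.items))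

-- ===== PRECONDITION & SPEC =====
def Spec_get_features_map (feature_names : List String) (real_feature_names : List String) (out : List (Int × List (String × Int))) : Prop := out = get_features_map_alt feature_names real_feature_names
instance (feature_names : List String) (real_feature_names : List String) (out : List (Int × List (String × Int))) : Decidable (Spec_get_features_map feature_names real_feature_names out) := by unfold Spec_get_features_map; infer_instance

-- ===== CLAIM (what is proved, stated in full; the proofs are below) =====
def Claim_equal_get_features_map : Prop := ∀ (feature_names : List String) (real_feature_names : List String), Dom_get_features_map feature_names real_feature_names → Spec_get_features_map feature_names real_feature_names (get_features_map feature_names real_feature_names)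

-- ===== LEMMAS AND PROOFS =====

-- the inner dict of one span, generalized over the dict it grows from
def runFold (fn : List String) (r : String) (m : PySem.Dict String Int) (lo hi : Nat) :
    PySem.Dict String Int :=
  if lo < hi then
    runFold fn r (m.insert (PySem.Str.replace (fn.getD lo "") (r ++ "=") "") (lo : Int)) (lo+1) hi
  else m
termination_by hi - lo
decreasing_by omega

-- the chained spans of a suffix of real names, with the final cursor
def spansFrom (fn : List String) (rs : List String) (i : Nat) : List (Nat × Nat) × Nat :=
  match rs with
  | [] => ([], i)
  | r :: rs =>
    let e := runEnd fn fn.length r i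
    let t := spansFrom fn rs e
    ((i, e) :: t.1, t.2)

-- reference form both programs are reduced to: one insert per nonempty span
def stageRef (fn : List String) (rs : List String)
    (d : PySem.Dict Int (PySem.Dict String Int)) (i : Nat) (j : Int) :
    PySem.Dict Int (PySem.Dict String Int) :=
  match rs with
  | [] => d
  | r :: rs =>
    let e := runEnd fn fn.length r i
    stageRef fn rs (if i < e then d.insert j (runFold fn r PySem.Dict.empty i e) else d) e (j+1)

theorem startswith_self (s : String) : PySem.Str.startswith s s = true := by
  simp [PySem.Chars.startswith_iff]

theorem runEnd_ge (fn : List String) (n : Nat) (r : String) :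
    ∀ k, k ≤ n → k ≤ runEnd fn n r k := by
  intro k
  induction hm : n - k generalizing k with
  | zero => intro hk; rw [runEnd]; split <;> omega
  | succ t ih =>
    intro hk
    rw [runEnd]
    split
    · split
      · omega
      · split
        · omega
        · have := ih (k+1) (by omega) (by omega)
          omega
    · omega

theorem stageRef_of_ge (fn : List String) :
    ∀ (rs : List String) (d : PySem.Dict Int (PySem.Dict String Int)) (i : Nat) (j : Int),
      fn.length ≤ i → stageRef fn rs d i j = d := by
  intro rs
  induction rs with
  | nil => intro d i j _; rfl
  | cons r rs ih =>
    intro d i j hi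
    have he : runEnd fn fn.length r i = fn.length := by
      rw [runEnd]; rw [dif_neg (by omega)]
    simp only [stageRef, he]
    rw [if_neg (by omega)]
    exact ih d fn.length (j+1) le_rfl

-- collapsing A's per-element pvPuts over one run into a single insert
theorem loopA_run (fn rn : List String) (j : Nat) (hj : j < rn.length) :
    ∀ i (m : PySem.Dict String Int) (d : PySem.Dict Int (PySem.Dict String Int)),
      loopA fn rn (d.insert (j : Int) m) i j
        = loopA fn rn
            (d.insert (j : Int)
              (runFold fn (rn.getD j "") m i (runEnd fn fn.length (rn.getD j "") i)))
            (runEnd fn fn.length (rn.getD j "") i) (j+1) := by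
  intro i
  induction hm : fn.length - i generalizing i with
  | zero =>
    intro m d
    have hi : fn.length ≤ i := by omega
    have he : runEnd fn fn.length (rn.getD j "") i = fn.length := by
      rw [runEnd]; rw [dif_neg (by omega)]
    have hrf : runFold fn (rn.getD j "") m i fn.length = m := by
      rw [runFold]; rw [if_neg (by omega)]
    rw [he, hrf]
    conv_lhs => rw [loopA]
    conv_rhs => rw [loopA]
    rw [if_neg (by omega), if_neg (by omega)]
  | succ t ih =>
    intro m d
    have hi : i < fn.length := by omega
    set r := rn.getD j "" with hr
    set f := fn.getD i "" with hf
    by_cases hsw : PySem.Str.startswith f r = true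
    · by_cases heq : f = r
      · -- exact match: run ends at i+1
        have he : runEnd fn fn.length r i = i + 1 := by
          rw [runEnd]; rw [dif_pos hi, if_neg (by rw [← hf]; simpa using hsw), if_pos (by rw [← hf, heq])]
        have hrf : runFold fn r m i (i+1)
            = m.insert (PySem.Str.replace f (r ++ "=") "") (i : Int) := by
          rw [runFold]; rw [if_pos (by omega), runFold]; rw [if_neg (by omega), ← hf]
        rw [he, hrf]
        conv_lhs => rw [loopA]
        rw [if_pos ⟨hi, hj⟩, if_pos (by rw [← hf, ← hr, heq])]
        have hput : pvPut (d.insert (j : Int) m) j f r i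
            = d.insert (j : Int) (m.insert (PySem.Str.replace f (r ++ "=") "") (i : Int)) := by
          unfold pvPut
          rw [PySem.Dict.getD_insert_self, PySem.Dict.insert_insert_self]
        rw [← hf, ← hr, hput]
      · -- prefix match: record and continue the run
        have he : runEnd fn fn.length r i = runEnd fn fn.length r (i+1) := by
          conv_lhs => rw [runEnd]
          rw [dif_pos hi, if_neg (by rw [← hf]; simpa using hsw), if_neg (by rw [← hf]; exact heq)]
        have hlt : i < runEnd fn fn.length r i := by
          rw [he]; have := runEnd_ge fn fn.length r (i+1) (by omega); omega
        have hrf : runFold fn r m i (runEnd fn fn.length r i)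
            = runFold fn r (m.insert (PySem.Str.replace f (r ++ "=") "") (i : Int)) (i+1)
                (runEnd fn fn.length r (i+1)) := by
          conv_lhs => rw [runFold]
          rw [if_pos hlt, ← hf, he]
        conv_lhs => rw [loopA]
        rw [if_pos ⟨hi, hj⟩, if_neg (by rw [← hf, ← hr]; exact heq),
          if_pos (by rw [← hf, ← hr]; exact hsw)]
        have hput : pvPut (d.insert (j : Int) m) j f r i
            = d.insert (j : Int) (m.insert (PySem.Str.replace f (r ++ "=") "") (i : Int)) := by
          unfold pvPut
          rw [PySem.Dict.getD_insert_self, PySem.Dict.insert_insert_self]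
        rw [← hf, ← hr, hput, hrf, he]
        exact ih (i+1) (by omega) _ d
    · -- mismatch: run ends here
      have he : runEnd fn fn.length r i = i := by
        rw [runEnd]; rw [dif_pos hi, if_pos (by rw [← hf]; exact hsw)]
      have hrf : runFold fn r m i i = m := by
        rw [runFold]; rw [if_neg (by omega)]
      rw [he, hrf]
      conv_lhs => rw [loopA]
      have hne : ¬ f = r := by
        intro h; exact hsw (by rw [h]; exact startswith_self r)
      rw [if_pos ⟨hi, hj⟩, if_neg (by rw [← hf, ← hr]; exact hne),
        if_neg (by rw [← hf, ← hr]; simpa using hsw)]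

-- A's loop equals the staged reference (keys of d all below jn keep jn fresh)
theorem loopA_eq_stageRef (fn rn : List String) :
    ∀ (jn i : Nat) (d : PySem.Dict Int (PySem.Dict String Int)),
      (∀ k ∈ d.keys, k < (jn : Int)) →
      loopA fn rn d i jn = stageRef fn (rn.drop jn) d i (jn : Int) := by
  intro jn
  induction hm : rn.length - jn generalizing jn with
  | zero =>
    intro i d _
    have hj : rn.length ≤ jn := by omega
    rw [List.drop_of_length_le hj]
    rw [loopA]; rw [if_neg (by omega)]; rfl
  | succ t ih =>
    intro i d hfresh
    have hj : jn < rn.length := by omega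
    have hget : rn[jn] = rn.getD jn "" := by simp [List.getD_eq_getElem?_getD, hj]
    have hdrop : rn.drop jn = rn.getD jn "" :: rn.drop (jn+1) := by
      rw [List.drop_eq_getElem_cons hj, hget]
    set r := rn.getD jn "" with hr
    set e := runEnd fn fn.length r i with hedef
    have hcast : ((jn : Int) + 1) = ((jn + 1 : Nat) : Int) := by push_cast; ring
    have hfresh' : ∀ (v : PySem.Dict String Int) k,
        k ∈ (d.insert (jn : Int) v).keys → k < ((jn + 1 : Nat) : Int) := by
      intro v k hk
      rcases (PySem.Dict.mem_keys_insert d _ k v).1 hk with h | h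
      · subst h; push_cast; omega
      · have := hfresh k h; push_cast; omega
    have hfresh'' : ∀ k ∈ d.keys, k < ((jn + 1 : Nat) : Int) := by
      intro k hk; have := hfresh k hk; push_cast; omega
    have hcont : d.contains ((jn : Nat) : Int) = false := by
      cases hc : d.contains ((jn : Nat) : Int)
      · rfl
      · have hkmem : ((jn : Nat) : Int) ∈ d.keys := (PySem.Dict.contains_iff_mem_keys d _).1 hc
        have := hfresh _ hkmem; omega
    have hgetDj : d.getD ((jn : Nat) : Int) PySem.Dict.empty = PySem.Dict.empty :=
      PySem.Dict.getD_of_not_contains d _ hcont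
    rw [hdrop]
    simp only [stageRef]
    rw [← hedef, hcast]
    by_cases hin : i < fn.length
    · set f := fn.getD i "" with hf
      by_cases hsw : PySem.Str.startswith f r = true
      · by_cases heq : f = r
        · -- exact match: one-element run, both cursors advance
          have he : e = i + 1 := by
            rw [hedef, runEnd]
            rw [dif_pos hin, if_neg (by rw [← hf]; simpa using hsw), if_pos (by rw [← hf, heq])]
          have hrf : runFold fn r PySem.Dict.empty i e
              = PySem.Dict.empty.insert (PySem.Str.replace f (r ++ "=") "") (i : Int) := by
            rw [he, runFold]; rw [if_pos (by omega), runFold]; rw [if_neg (by omega), ← hf]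
          conv_lhs => rw [loopA]
          rw [if_pos ⟨hin, hj⟩, if_pos (by rw [← hf, ← hr, heq])]
          have hput : pvPut d jn (fn.getD i "") (rn.getD jn "") i
              = d.insert ((jn : Nat) : Int) (runFold fn r PySem.Dict.empty i e) := by
            unfold pvPut
            rw [hgetDj, hrf, ← hf, ← hr]
          rw [hput, if_pos (by omega), he]
          exact ih (jn+1) (by omega) (i+1) _ (hfresh' _)
        · -- strict prefix: record, run continues
          have he' : e = runEnd fn fn.length r (i+1) := by
            rw [hedef]; conv_lhs => rw [runEnd]
            rw [dif_pos hin, if_neg (by rw [← hf]; simpa using hsw), if_neg (by rw [← hf]; exact heq)]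
          have hlt : i < e := by
            rw [he']; have := runEnd_ge fn fn.length r (i+1) (by omega); omega
          have hrf2 : runFold fn r (PySem.Dict.empty.insert
                  (PySem.Str.replace f (r ++ "=") "") (i : Int)) (i+1) e
              = runFold fn r PySem.Dict.empty i e := by
            conv_rhs => rw [runFold]
            rw [if_pos hlt, ← hf]
          conv_lhs => rw [loopA]
          rw [if_pos ⟨hin, hj⟩, if_neg (by rw [← hf, ← hr]; exact heq),
            if_pos (by rw [← hf, ← hr]; exact hsw)]
          have hput : pvPut d jn (fn.getD i "") (rn.getD jn "") i
              = d.insert ((jn : Nat) : Int) (PySem.Dict.empty.insert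
                  (PySem.Str.replace f (r ++ "=") "") (i : Int)) := by
            unfold pvPut
            rw [hgetDj, ← hf, ← hr]
          rw [hput, loopA_run fn rn jn hj (i+1) _ d, ← hr, ← he', hrf2]
          rw [if_pos hlt]
          exact ih (jn+1) (by omega) e _ (hfresh' _)
      · -- mismatch: empty run, jn advances
        have he : e = i := by
          rw [hedef, runEnd]; rw [dif_pos hin, if_pos (by rw [← hf]; exact hsw)]
        have hne : ¬ f = r := by
          intro h; exact hsw (by rw [h]; exact startswith_self r)
        conv_lhs => rw [loopA]
        rw [if_pos ⟨hin, hj⟩, if_neg (by rw [← hf, ← hr]; exact hne),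
          if_neg (by rw [← hf, ← hr]; simpa using hsw)]
        rw [if_neg (by omega), he]
        exact ih (jn+1) (by omega) i d hfresh''
    · -- feature names exhausted
      have he : e = fn.length := by
        rw [hedef, runEnd]; rw [dif_neg (by omega)]
      rw [loopA]
      rw [if_neg (by omega), if_neg (by omega), he]
      exact (stageRef_of_ge fn _ d fn.length _ le_rfl).symm

-- B-side: the inner comprehension over a span equals runFold from empty
theorem pyfold_eq_runFold (fn : List String) (r : String) :
    ∀ lo hi : Nat, ∀ m : PySem.Dict String Int,
      ((PySem.List.pyRange (lo : Int) (hi : Int) 1).foldl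
        (fun m k => m.insert
          (PySem.Str.replace (PySem.List.pyGetD fn k "") (r ++ "=") "") k) m)
        = runFold fn r m lo hi := by
  intro lo hi
  induction hm : hi - lo generalizing lo with
  | zero =>
    intro m
    rw [PySem.List.pyRange_one_eq_nil (by omega), runFold]
    rw [if_neg (by omega)]
    rfl
  | succ t ih =>
    intro m
    have hlt : lo < hi := by omega
    rw [PySem.List.pyRange_one_cons (by exact_mod_cast hlt)]
    have hc : ((lo : Int) + 1) = ((lo + 1 : Nat) : Int) := by push_cast; ring
    rw [List.foldl_cons, hc, ih (lo+1) (by omega)]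
    conv_rhs => rw [runFold]
    rw [if_pos hlt]
    simp [PySem.List.pyGetD_natCast]

-- B-side: the stage-1 fold produces the chained spans
theorem spansB_fold_eq (fn : List String) :
    ∀ (rs : List String) (pre : List (Nat × Nat)) (i : Nat),
      rs.foldl (fun acc r =>
        let e := runEnd fn fn.length r acc.2
        (acc.1 ++ [(acc.2, e)], e)) (pre, i)
        = (pre ++ (spansFrom fn rs i).1, (spansFrom fn rs i).2) := by
  intro rs
  induction rs with
  | nil => intro pre i; simp [spansFrom]
  | cons r rs ih =>
    intro pre i
    simp only [List.foldl_cons, spansFrom]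
    rw [ih]
    simp

-- B-side: the stage-2 fold over the spans equals the staged reference
theorem altfold_eq_stageRef (fn : List String) :
    ∀ (rs : List String) (i : Nat) (j : Int) (d : PySem.Dict Int (PySem.Dict String Int)),
      (PySem.List.enumerate (rs.zip (spansFrom fn rs i).1) j).foldl
        (fun d p =>
          if p.2.2.1 < p.2.2.2 then
            d.insert p.1 ((PySem.List.pyRange (p.2.2.1 : Int) (p.2.2.2 : Int) 1).foldl
              (fun m k => m.insert
                (PySem.Str.replace (PySem.List.pyGetD fn k "") (p.2.1 ++ "=") "") k)
              PySem.Dict.empty)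
          else d) d
        = stageRef fn rs d i j := by
  intro rs
  induction rs with
  | nil => intro i j d; rfl
  | cons r rs ih =>
    intro i j d
    simp only [spansFrom, List.zip_cons_cons, PySem.List.enumerate_cons, List.foldl_cons]
    rw [pyfold_eq_runFold]
    simp only [stageRef]
    exact ih _ (j+1) _

-- ===== VERDICT (by name: the statement is the Claim_ definition above) =====
theorem get_features_map_spec : Claim_equal_get_features_map := by
  intro fn rn _
  unfold Spec_get_features_map get_features_map get_features_map_alt
  have h1 : loopA fn rn PySem.Dict.empty 0 0 = stageRef fn rn PySem.Dict.empty 0 0 := by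
    have := loopA_eq_stageRef fn rn 0 0 PySem.Dict.empty (by simp [PySem.Dict.keys_empty])
    simpa using this
  have h2 : (spansB fn rn).1 = (spansFrom fn rn 0).1 := by
    unfold spansB
    rw [spansB_fold_eq fn rn [] 0]
    simp
  rw [h1, h2, altfold_eq_stageRef fn rn 0 0 PySem.Dict.empty]
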